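-- pv_equiv track=rewrite | github.com/Suineg-Darhnoel/KhmerOCR | detect_textline.py | get_upper_lower_poses
-- ===== SOURCE A (Python) =====
-- def get_upper_lower_poses(stats, image_shape, threshold):
--     """
--     get_upper_lower_poses
--     ---------------------
--         tells where every upper and bottom line of a text should be drawn
--
--     Parameters:
--     -----------
--         stats:
--             can be computed by get_stats(rotated_image)
--                 (see get_stats function)
--         image_shape:
--             shape of the grayscale image corresponding to the original one
--         threshold:
--             should be chosen from the interval [stats_min, stats_max]
--             the default for this experiment is stats_avg
--     """
--     H, W = image_shape
--     uppers = [
--                 i for i in range(H-1)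
--                 if stats[i] <= threshold
--                 and stats[i+1] > threshold
--             ]
--
--     lowers = [
--                 i for i in range(H-1)
--                 if stats[i] > threshold
--                 and stats[i+1] <= threshold
--             ]
--
--     return uppers, lowers
-- ===== SOURCE B (Python) =====
-- def get_upper_lower_poses(stats, image_shape, threshold):
--     H, W = image_shape
--     uppers, lowers = [], []
--     if H > 1:
--         # Stage 1: run-length encode the below-threshold flags of rows 0..H-1.
--         runs = []
--         for i in range(H):
--             f = stats[i] <= threshold
--             if runs and runs[-1][0] == f:
--                 runs[-1][1] += 1
--             else:
--                 runs.append([f, 1])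
--         # Stage 2: each run except the last ends at a transition; classify it
--         # by the run's flag (below run ending -> upper, above run ending -> lower).
--         pos = 0
--         for f, n in runs[:-1]:
--             pos += n
--             (uppers if f else lowers).append(pos - 1)
--     return uppers, lowers
-- ===== Notes on version B (the rewrite author's own statement) =====
-- stated objective: alternative
-- what changed: Instead of A's two filtered passes of pairwise comparisons, B run-length encodes the below-threshold flags of the rows and then classifies each run boundary (cumulative length - 1) into uppers or lowers by the ending run's flag.
import Mathlib
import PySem

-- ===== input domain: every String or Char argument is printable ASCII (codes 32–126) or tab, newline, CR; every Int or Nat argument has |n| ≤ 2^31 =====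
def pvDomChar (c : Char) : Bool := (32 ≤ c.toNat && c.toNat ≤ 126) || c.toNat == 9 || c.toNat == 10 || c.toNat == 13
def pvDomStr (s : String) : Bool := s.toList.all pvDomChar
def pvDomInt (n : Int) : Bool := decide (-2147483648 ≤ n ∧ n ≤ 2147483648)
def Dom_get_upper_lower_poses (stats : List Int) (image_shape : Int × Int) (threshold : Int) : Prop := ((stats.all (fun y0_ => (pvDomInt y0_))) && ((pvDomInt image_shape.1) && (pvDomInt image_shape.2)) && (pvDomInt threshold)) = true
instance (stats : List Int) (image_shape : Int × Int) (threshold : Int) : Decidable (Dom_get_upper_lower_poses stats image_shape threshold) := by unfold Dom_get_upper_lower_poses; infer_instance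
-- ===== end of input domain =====

-- B finds the transitions by run-length encoding the below-threshold flags and classifying each run boundary via a prefix-sum pass, instead of A's two pairwise-comparison filters (alternative decomposition, same cost).


-- ===== PORT A =====
-- Two list comprehensions over range(H-1); indexing is PySem.List.pyGetD (in range on every input admitted by Pre_).
def get_upper_lower_poses (stats : List Int) (image_shape : Int × Int) (threshold : Int) : List Int × List Int :=
  let H := image_shape.1
  let uppers := (PySem.List.pyRange 0 (H - 1) 1).filter (fun i =>
      decide (PySem.List.pyGetD stats i 0 ≤ threshold) &&
      decide (threshold < PySem.List.pyGetD stats (i + 1) 0))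
  let lowers := (PySem.List.pyRange 0 (H - 1) 1).filter (fun i =>
      decide (threshold < PySem.List.pyGetD stats i 0) &&
      decide (PySem.List.pyGetD stats (i + 1) 0 ≤ threshold))
  (uppers, lowers)

-- ===== PORT B =====
-- Stage 1 step: extend the run-length encoding by one flag (Python: runs[-1][1] += 1 or runs.append([f,1])).
def pvRleStep (runs : List (Bool × Int)) (f : Bool) : List (Bool × Int) :=
  match runs.getLast? with
  | some (g, n) => if g == f then runs.dropLast ++ [(g, n + 1)] else runs ++ [(f, 1)]
  | none => [(f, 1)]

-- Stage 2 step: a run of length n ending at cumulative position pos yields boundary pos-1, classified by its flag.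
def pvBoundStep (acc : (List Int × List Int) × Int) (r : Bool × Int) : (List Int × List Int) × Int :=
  let pos := acc.2 + r.2
  if r.1 then ((acc.1.1 ++ [pos - 1], acc.1.2), pos)
  else ((acc.1.1, acc.1.2 ++ [pos - 1]), pos)

def get_upper_lower_poses_alt (stats : List Int) (image_shape : Int × Int) (threshold : Int) : List Int × List Int :=
  let H := image_shape.1
  if 1 < H then
    let runs := (PySem.List.pyRange 0 H 1).foldl
      (fun rs i => pvRleStep rs (decide (PySem.List.pyGetD stats i 0 ≤ threshold))) []
    (runs.dropLast.foldl pvBoundStep (([], []), 0)).1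
  else ([], [])

-- ===== PRECONDITION & SPEC =====
-- Pre_ excludes exactly the inputs where Python A raises IndexError: H ≥ 2 with fewer than H rows in stats.
def Pre_get_upper_lower_poses (stats : List Int) (image_shape : Int × Int) (threshold : Int) : Prop :=
  image_shape.1 ≤ 1 ∨ image_shape.1 ≤ (stats.length : Int)
instance (stats : List Int) (image_shape : Int × Int) (threshold : Int) : Decidable (Pre_get_upper_lower_poses stats image_shape threshold) := by unfold Pre_get_upper_lower_poses; infer_instance

def pvWitness_get_upper_lower_poses : List Int × (Int × Int) × Int := ([0, 5, 0], (3, 4), 2)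

def Spec_get_upper_lower_poses (stats : List Int) (image_shape : Int × Int) (threshold : Int) (out : List Int × List Int) : Prop := out = get_upper_lower_poses_alt stats image_shape threshold
instance (stats : List Int) (image_shape : Int × Int) (threshold : Int) (out : List Int × List Int) : Decidable (Spec_get_upper_lower_poses stats image_shape threshold out) := by unfold Spec_get_upper_lower_poses; infer_instance

-- ===== CLAIM (what is proved, stated in full; the proofs are below) =====
def Claim_equal_get_upper_lower_poses : Prop := ∀ (stats : List Int) (image_shape : Int × Int) (threshold : Int), Dom_get_upper_lower_poses stats image_shape threshold → Pre_get_upper_lower_poses stats image_shape threshold → Spec_get_upper_lower_poses stats image_shape threshold (get_upper_lower_poses stats image_shape threshold)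

-- ===== LEMMAS AND PROOFS =====

-- The RLE fold with the per-row test abstracted as g.
def pvRg (g : Int → Bool) (n : Nat) : List (Bool × Int) :=
  (PySem.List.pyRange 0 (n : Int) 1).foldl (fun rs i => pvRleStep rs (g i)) []

-- A's two filters, abstracted.
def pvUp (g : Int → Bool) (b : Int) : List Int :=
  (PySem.List.pyRange 0 b 1).filter (fun i => g i && !g (i + 1))
def pvLo (g : Int → Bool) (b : Int) : List Int :=
  (PySem.List.pyRange 0 b 1).filter (fun i => !g i && g (i + 1))

-- On a stretch where g is constant, neither transition filter picks anything.
theorem pvFilterNil (g : Int → Bool) (a b : Int) (c : Bool)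
    (h : ∀ i : Int, a ≤ i → i < b + 1 → g i = c) :
    (PySem.List.pyRange a b 1).filter (fun i => g i && !g (i + 1)) = [] ∧
    (PySem.List.pyRange a b 1).filter (fun i => !g i && g (i + 1)) = [] := by
  constructor <;>
  · refine List.filter_eq_nil_iff.mpr ?_
    intro x hx
    rw [PySem.List.mem_pyRange_one] at hx
    have h1 : g x = c := h x hx.1 (by omega)
    have h2 : g (x + 1) = c := h (x + 1) (by omega) (by omega)
    simp [h1, h2]

-- Loop invariant for the RLE fold over rows 0..n-1: the encoding splits as P ++ [last run],
-- the last run has flag g(n-m) and covers rows n-m..n-1 (on which g is constant), and the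
-- boundary pass over P yields exactly the transition filters restricted to [0, n-m).
theorem pvInv (g : Int → Bool) : ∀ n : Nat, 1 ≤ n →
    ∃ (P : List (Bool × Int)) (m : Nat), 1 ≤ m ∧ m ≤ n ∧
      pvRg g n = P ++ [(g ((n - m : Nat) : Int), (m : Int))] ∧
      (∀ i : Int, ((n - m : Nat) : Int) ≤ i → i < (n : Int) → g i = g ((n - m : Nat) : Int)) ∧
      P.foldl pvBoundStep (([], []), 0) = ((pvUp g ((n - m : Nat) : Int), pvLo g ((n - m : Nat) : Int)), ((n - m : Nat) : Int)) := by
  intro n hn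
  induction n with
  | zero => omega
  | succ n ih =>
    by_cases hn1 : 1 ≤ n
    · obtain ⟨P, m, hm1, hmn, hR, hconst, hB⟩ := ih hn1
      have hsplit : pvRg g (n + 1) = pvRleStep (pvRg g n) (g (n : Int)) := by
        unfold pvRg
        have : PySem.List.pyRange 0 ((n + 1 : Nat) : Int) 1
            = PySem.List.pyRange 0 (n : Int) 1 ++ [(n : Int)] := by
          have := PySem.List.pyRange_one_succ_right (a := 0) (b := (n : Int)) (by positivity)
          push_cast; push_cast at this; exact this
        rw [this, List.foldl_append]; rfl
      set f := g ((n - m : Nat) : Int) with hf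
      have hlast : (pvRg g n).getLast? = some (f, (m : Int)) := by
        rw [hR]; exact List.getLast?_concat
      have hdrop : (pvRg g n).dropLast = P := by
        rw [hR]; exact List.dropLast_concat
      by_cases hfg : f = g (n : Int)
      · refine ⟨P, m + 1, by omega, by omega, ?_, ?_, ?_⟩
        · rw [hsplit]
          unfold pvRleStep
          rw [hlast]
          simp only [← hfg, beq_self_eq_true, if_true, hdrop]
          have : ((n + 1 - (m + 1) : Nat) : Int) = ((n - m : Nat) : Int) := by omega
          rw [this]
          have : ((m + 1 : Nat) : Int) = (m : Int) + 1 := by push_cast; ring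
          rw [this]
        · intro i hi1 hi2
          have hc : ((n + 1 - (m + 1) : Nat) : Int) = ((n - m : Nat) : Int) := by omega
          rw [hc] at hi1 ⊢
          rcases lt_or_eq_of_le (by omega : i ≤ (n : Int)) with h | h
          · exact hconst i hi1 (by omega)
          · rw [h, ← hfg]
        · have hc : ((n + 1 - (m + 1) : Nat) : Int) = ((n - m : Nat) : Int) := by omega
          rw [hc]; exact hB
      · refine ⟨P ++ [(f, (m : Int))], 1, le_refl 1, by omega, ?_, ?_, ?_⟩
        · rw [hsplit]
          unfold pvRleStep
          rw [hlast]
          have hbeq : (f == g (n : Int)) = false := by simp [hfg]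
          have hc : ((n + 1 - 1 : Nat) : Int) = (n : Int) := by omega
          simp [hbeq, hR]
        · intro i hi1 hi2
          have hc : ((n + 1 - 1 : Nat) : Int) = (n : Int) := by omega
          rw [hc] at hi1 ⊢
          have hieq : i = (n : Int) := by omega
          rw [hieq]
        · rw [List.foldl_append, hB]
          have hgn : g (n : Int) = !f := by
            cases hgn' : g (n : Int) <;> cases hf' : f <;> simp_all
          have hnm1 : ((n - m : Nat) : Int) ≤ (n : Int) - 1 := by omega
          -- split the filters of [0, n) at n-m, then at n-1
          have hsp : PySem.List.pyRange 0 (n : Int) 1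
              = PySem.List.pyRange 0 ((n - m : Nat) : Int) 1
                ++ PySem.List.pyRange ((n - m : Nat) : Int) ((n : Int) - 1) 1 ++ [(n : Int) - 1] := by
            have h1 := PySem.List.pyRange_one_append 0 ((n - m : Nat) : Int) (n : Int) (by positivity) (by omega)
            have h2 := PySem.List.pyRange_one_succ_right (a := ((n - m : Nat) : Int)) (b := (n : Int) - 1) hnm1
            have h3 : (n : Int) - 1 + 1 = (n : Int) := by ring
            rw [h3] at h2
            rw [h1, h2, List.append_assoc]
          have hmidnil := pvFilterNil g ((n - m : Nat) : Int) ((n : Int) - 1) f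
            (fun i h1 h2 => hconst i h1 (by omega))
          have hg1 : g ((n : Int) - 1) = f := hconst _ (by omega) (by omega)
          have hg2 : g ((n : Int) - 1 + 1) = !f := by
            have : (n : Int) - 1 + 1 = (n : Int) := by ring
            rw [this, hgn]
          have hup : pvUp g (n : Int) = pvUp g ((n - m : Nat) : Int) ++ (if f then [(n : Int) - 1] else []) := by
            unfold pvUp
            rw [hsp, List.filter_append, List.filter_append, hmidnil.1, List.filter_cons, List.filter_nil]
            cases hf' : f <;> simp [hg1, hgn, hf']
          have hlo : pvLo g (n : Int) = pvLo g ((n - m : Nat) : Int) ++ (if f then [] else [(n : Int) - 1]) := by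
            unfold pvLo
            rw [hsp, List.filter_append, List.filter_append, hmidnil.2, List.filter_cons, List.filter_nil]
            cases hf' : f <;> simp [hg1, hgn, hf']
          have hc : ((n + 1 - 1 : Nat) : Int) = (n : Int) := by omega
          rw [hc, hup, hlo]
          unfold pvBoundStep
          have hpos : ((n - m : Nat) : Int) + (m : Int) = (n : Int) := by omega
          cases hf' : f <;> simp [hpos]
    · -- n + 1 = 1
      have hn0 : n = 0 := by omega
      subst hn0
      refine ⟨[], 1, le_refl 1, le_refl 1, ?_, ?_, ?_⟩
      · unfold pvRg
        have h1 : ((1 : Nat) : Int) = 0 + 1 := by norm_num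
        rw [h1, PySem.List.pyRange_one_singleton]
        simp [pvRleStep]
      · intro i h1 h2
        have h0 : ((1 - 1 : Nat) : Int) = 0 := by norm_num
        rw [h0] at h1 ⊢
        have hieq : i = 0 := by omega
        rw [hieq]
      · simp [pvUp, pvLo]

-- ===== VERDICT (by name: the statement is the Claim_ definition above) =====
theorem get_upper_lower_poses_spec : Claim_equal_get_upper_lower_poses := by
  intro stats image_shape threshold _ _
  unfold Spec_get_upper_lower_poses get_upper_lower_poses get_upper_lower_poses_alt
  set g : Int → Bool := fun i => decide (PySem.List.pyGetD stats i 0 ≤ threshold) with hg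
  by_cases hH : 1 < image_shape.1
  · simp only [if_pos hH]
    set n : Nat := image_shape.1.toNat with hn
    have hcast : image_shape.1 = (n : Int) := by omega
    obtain ⟨P, m, hm1, hmn, hR, hconst, hB⟩ := pvInv g n (by omega)
    have hruns : (PySem.List.pyRange 0 image_shape.1 1).foldl
        (fun rs i => pvRleStep rs (decide (PySem.List.pyGetD stats i 0 ≤ threshold))) [] = pvRg g n := by
      rw [hcast]; rfl
    rw [hruns, hR, List.dropLast_concat, hB]
    have hnm1 : ((n - m : Nat) : Int) ≤ (n : Int) - 1 := by omega
    have hmid := pvFilterNil g ((n - m : Nat) : Int) ((n : Int) - 1) (g ((n - m : Nat) : Int))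
      (fun i h1 h2 => hconst i h1 (by omega))
    have hsp : PySem.List.pyRange 0 ((n : Int) - 1) 1
        = PySem.List.pyRange 0 ((n - m : Nat) : Int) 1
          ++ PySem.List.pyRange ((n - m : Nat) : Int) ((n : Int) - 1) 1 :=
      PySem.List.pyRange_one_append 0 ((n - m : Nat) : Int) ((n : Int) - 1) (by positivity) hnm1
    have hup : pvUp g ((n : Int) - 1) = pvUp g ((n - m : Nat) : Int) := by
      unfold pvUp; rw [hsp, List.filter_append, hmid.1, List.append_nil]
    have hlo : pvLo g ((n : Int) - 1) = pvLo g ((n - m : Nat) : Int) := by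
      unfold pvLo; rw [hsp, List.filter_append, hmid.2, List.append_nil]
    rw [← hup, ← hlo, hcast]
    unfold pvUp pvLo
    simp only [hg, ← decide_not, not_le]
  · simp only [if_neg hH]
    have hnil : PySem.List.pyRange 0 (image_shape.1 - 1) 1 = [] :=
      PySem.List.pyRange_one_eq_nil (by omega)
    simp [hnil]
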